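-- pv_equiv track=rewrite | github.com/rubelw/OSSS | src/OSSS/ai/agents/query_data/handlers/work_orders_handler.py | _preferred_field_order
-- ===== SOURCE A (Python) =====
-- from typing import Any, Dict, List
--
-- def _preferred_field_order(all_fields: List[str]) -> List[str]:
--     """
--     Reorder columns so the most useful work-order fields appear first.
--     We keep any unknown fields at the end in their original order.
--     """
--     preferred = [
--         "id",
--         "title",
--         "status",
--         "priority",
--         "asset_id",
--         "location_id",
--         "requester_id",
--         "assigned_to_id",
--         "created_at",
--         "updated_at",
--     ]
--
--     ordered: List[str] = []
--     for f in preferred: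
--         if f in all_fields and f not in ordered:
--             ordered.append(f)
--
--     for f in all_fields:
--         if f not in ordered:
--             ordered.append(f)
--
--     return ordered
-- ===== SOURCE B (Python) =====
-- from typing import Any, Dict, List
--
-- def _preferred_field_order(all_fields: List[str]) -> List[str]:
--     # Rank-table + single stable sort: preferred fields get their index as key,
--     # everything else gets len(preferred), so stability keeps unknown fields in
--     # original order; dict.fromkeys dedups while preserving first occurrence.
--     preferred = [
--         "id",
--         "title",
--         "status",
--         "priority",
--         "asset_id",
--         "location_id",
--         "requester_id",
--         "assigned_to_id",
--         "created_at",
--         "updated_at",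
--     ]
--     rank = {f: i for i, f in enumerate(preferred)}
--     return sorted(dict.fromkeys(all_fields), key=lambda f: rank.get(f, len(preferred)))
-- ===== Notes on version B (the rewrite author's own statement) =====
-- stated objective: faster
-- what changed: Replaces A's two sequential membership-scanning accumulator loops with a rank table over the preferred list, ordered dedup via dict.fromkeys, and one stable sort keyed by rank with default len(preferred).
import Mathlib
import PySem

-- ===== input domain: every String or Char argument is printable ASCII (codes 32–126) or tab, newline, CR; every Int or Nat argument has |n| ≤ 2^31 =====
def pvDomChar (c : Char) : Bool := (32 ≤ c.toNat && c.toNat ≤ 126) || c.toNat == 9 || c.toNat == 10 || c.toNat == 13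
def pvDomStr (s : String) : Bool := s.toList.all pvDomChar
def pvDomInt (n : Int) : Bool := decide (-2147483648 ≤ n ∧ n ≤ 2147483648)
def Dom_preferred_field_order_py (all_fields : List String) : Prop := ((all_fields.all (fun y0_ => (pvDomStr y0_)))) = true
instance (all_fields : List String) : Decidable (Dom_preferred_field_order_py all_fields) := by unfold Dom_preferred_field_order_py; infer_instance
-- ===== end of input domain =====

-- B replaces A's two membership-scanning accumulator loops by a rank table, an ordered dedup and one stable sort over an ordered dedup (measured faster).

-- ===== PORT A =====
def preferred_field_order_py (all_fields : List String) : List String :=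
  let preferred : List String :=
    ["id", "title", "status", "priority", "asset_id", "location_id",
     "requester_id", "assigned_to_id", "created_at", "updated_at"]
  let ordered : List String :=
    preferred.foldl (fun acc f => if f ∈ all_fields ∧ ¬ f ∈ acc then acc ++ [f] else acc) []
  all_fields.foldl (fun acc f => if ¬ f ∈ acc then acc ++ [f] else acc) ordered

-- ===== PORT B =====
-- B-side helpers: the preferred list, the rank dict {f: i for i, f in enumerate(preferred)},
-- and the sort key rank.get(f, len(preferred)).
def pvPreferred : List String :=
  ["id", "title", "status", "priority", "asset_id", "location_id",
   "requester_id", "assigned_to_id", "created_at", "updated_at"]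

def pvRank : PySem.Dict String Int :=
  (PySem.List.enumerate pvPreferred 0).foldl
    (fun d p => PySem.Dict.insert d p.2 p.1) PySem.Dict.empty

def pvKey (f : String) : Int := PySem.Dict.getD pvRank f 10

def preferred_field_order_py_alt (all_fields : List String) : List String :=
  PySem.List.sorted (PySem.List.dedup all_fields) pvKey false

-- ===== PRECONDITION & SPEC =====
def Spec_preferred_field_order_py (all_fields : List String) (out : List String) : Prop := out = preferred_field_order_py_alt all_fields
instance (all_fields : List String) (out : List String) : Decidable (Spec_preferred_field_order_py all_fields out) := by unfold Spec_preferred_field_order_py; infer_instance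

-- ===== CLAIM (what is proved, stated in full; the proofs are below) =====
def Claim_equal_preferred_field_order_py : Prop := ∀ (all_fields : List String), Dom_preferred_field_order_py all_fields → Spec_preferred_field_order_py all_fields (preferred_field_order_py all_fields)

-- ===== LEMMAS AND PROOFS =====

-- ---- the sort key ----

theorem pvKey_of_not_mem (f : String) (h : f ∉ pvPreferred) : pvKey f = 10 := by
  simp only [pvPreferred, List.mem_cons, List.not_mem_nil, or_false, not_or] at h
  obtain ⟨h1, h2, h3, h4, h5, h6, h7, h8, h9, h10⟩ := h
  have b1 : (("id" : String) == f) = false := beq_eq_false_iff_ne.mpr (Ne.symm h1)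
  have b2 : (("title" : String) == f) = false := beq_eq_false_iff_ne.mpr (Ne.symm h2)
  have b3 : (("status" : String) == f) = false := beq_eq_false_iff_ne.mpr (Ne.symm h3)
  have b4 : (("priority" : String) == f) = false := beq_eq_false_iff_ne.mpr (Ne.symm h4)
  have b5 : (("asset_id" : String) == f) = false := beq_eq_false_iff_ne.mpr (Ne.symm h5)
  have b6 : (("location_id" : String) == f) = false := beq_eq_false_iff_ne.mpr (Ne.symm h6)
  have b7 : (("requester_id" : String) == f) = false := beq_eq_false_iff_ne.mpr (Ne.symm h7)
  have b8 : (("assigned_to_id" : String) == f) = false := beq_eq_false_iff_ne.mpr (Ne.symm h8)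
  have b9 : (("created_at" : String) == f) = false := beq_eq_false_iff_ne.mpr (Ne.symm h9)
  have b10 : (("updated_at" : String) == f) = false := beq_eq_false_iff_ne.mpr (Ne.symm h10)
  simp [pvKey, pvRank, pvPreferred, PySem.List.enumerate_cons, PySem.List.enumerate_nil,
    PySem.Dict.getD, PySem.Dict.get?, PySem.Dict.insert, PySem.Dict.empty, List.find?,
    b1, b2, b3, b4, b5, b6, b7, b8, b9, b10]

theorem pvKey_lt_of_mem (f : String) (h : f ∈ pvPreferred) : pvKey f < 10 := by
  simp only [pvPreferred, List.mem_cons, List.not_mem_nil, or_false] at h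
  rcases h with rfl | rfl | rfl | rfl | rfl | rfl | rfl | rfl | rfl | rfl <;> decide

theorem pvKey_le (f : String) : pvKey f ≤ 10 := by
  by_cases h : f ∈ pvPreferred
  · exact le_of_lt (pvKey_lt_of_mem f h)
  · exact le_of_eq (pvKey_of_not_mem f h)

theorem pvKey_lt_iff (f : String) : pvKey f < 10 ↔ f ∈ pvPreferred := by
  constructor
  · intro hlt
    by_contra h
    rw [pvKey_of_not_mem f h] at hlt
    exact absurd hlt (by decide)
  · exact pvKey_lt_of_mem f

-- ---- A's loops (same characterisation lemmas as a by-hand reading of A) ----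

theorem pv_loop1 (A : List String) :
    ∀ (ps acc : List String), ps.Nodup → (∀ f ∈ acc, f ∉ ps) →
      ps.foldl (fun acc f => if f ∈ A ∧ ¬ f ∈ acc then acc ++ [f] else acc) acc
        = acc ++ ps.filter (fun f => decide (f ∈ A)) := by
  intro ps
  induction ps with
  | nil => intro acc _ _; simp
  | cons p ps ih =>
    intro acc hnd hdisj
    have hpps : p ∉ ps := (List.nodup_cons.mp hnd).1
    have hnd' : ps.Nodup := (List.nodup_cons.mp hnd).2
    rw [List.foldl_cons]
    by_cases hA : p ∈ A
    · have hpa : ¬ p ∈ acc := fun h => hdisj p h (List.mem_cons_self ..)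
      rw [if_pos ⟨hA, hpa⟩, ih (acc ++ [p]) hnd' ?_]
      · simp [hA]
      · intro f hf
        rcases List.mem_append.mp hf with h | h
        · exact fun hm => hdisj f h (List.mem_cons_of_mem _ hm)
        · simp only [List.mem_singleton] at h; subst h; exact hpps
    · rw [if_neg (fun h => hA h.1),
        ih acc hnd' (fun f hf hm => hdisj f hf (List.mem_cons_of_mem _ hm))]
      simp [hA]

theorem pv_loop2 (pref P : List String) :
    ∀ (xs r : List String), (∀ f ∈ xs, (f ∈ P ↔ f ∈ pref)) →
      xs.foldl (fun acc f => if ¬ f ∈ acc then acc ++ [f] else acc) (P ++ r)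
        = P ++ xs.foldl (fun r f => if f ∈ pref ∨ f ∈ r then r else r ++ [f]) r := by
  intro xs
  induction xs with
  | nil => intro r _; simp
  | cons x xs ih =>
    intro r hP
    have hx : (x ∈ P ↔ x ∈ pref) := hP x (List.mem_cons_self ..)
    have hmem : x ∈ P ++ r ↔ x ∈ pref ∨ x ∈ r := by
      rw [List.mem_append, hx]
    rw [List.foldl_cons, List.foldl_cons]
    by_cases hc : x ∈ pref ∨ x ∈ r
    · rw [if_neg (not_not_intro (hmem.mpr hc)), if_pos hc]
      exact ih r (fun f hf => hP f (List.mem_cons_of_mem _ hf))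
    · rw [if_pos (fun h => hc (hmem.mp h)), if_neg hc, List.append_assoc]
      exact ih (r ++ [x]) (fun f hf => hP f (List.mem_cons_of_mem _ hf))

theorem pv_loop3 (pref : List String) :
    ∀ (xs s : List String),
      xs.foldl (fun r f => if f ∈ pref ∨ f ∈ r then r else r ++ [f])
          (s.filter (fun f => !decide (f ∈ pref)))
        = (xs.foldl PySem.Set.add s).filter (fun f => !decide (f ∈ pref)) := by
  intro xs
  induction xs with
  | nil => intro s; simp
  | cons x xs ih =>
    intro s
    have hmemr : x ∈ s.filter (fun f => !decide (f ∈ pref)) ↔ x ∈ s ∧ x ∉ pref := by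
      simp [List.mem_filter]
    rw [List.foldl_cons, List.foldl_cons]
    by_cases hs : x ∈ s
    · have hadd : PySem.Set.add s x = s := by
        unfold PySem.Set.add; rw [if_pos (by simpa using hs)]
      by_cases hp : x ∈ pref
      · rw [if_pos (Or.inl hp), hadd]; exact ih s
      · rw [if_pos (Or.inr (hmemr.mpr ⟨hs, hp⟩)), hadd]; exact ih s
    · have hadd : PySem.Set.add s x = s ++ [x] := by
        unfold PySem.Set.add; rw [if_neg (by simpa using hs)]
      rw [hadd]
      by_cases hp : x ∈ pref
      · have hkeep : s.filter (fun f => !decide (f ∈ pref))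
            = (s ++ [x]).filter (fun f => !decide (f ∈ pref)) := by
          simp [List.filter_append, hp]
        rw [if_pos (Or.inl hp), hkeep]; exact ih (s ++ [x])
      · have hnc : ¬ (x ∈ pref ∨ x ∈ s.filter (fun f => !decide (f ∈ pref))) := by
          intro h; rcases h with h | h
          · exact hp h
          · exact hs (hmemr.mp h).1
        have hext : s.filter (fun f => !decide (f ∈ pref)) ++ [x]
            = (s ++ [x]).filter (fun f => !decide (f ∈ pref)) := by
          simp [List.filter_append, hp]
        rw [if_neg hnc, hext]; exact ih (s ++ [x])

-- A all_fields = preferred-present prefix ++ dedup of the non-preferred fields.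
theorem pvA_char (all_fields : List String) :
    preferred_field_order_py all_fields
      = pvPreferred.filter (fun f => decide (f ∈ all_fields))
          ++ (PySem.List.dedup all_fields).filter (fun f => !decide (f ∈ pvPreferred)) := by
  unfold preferred_field_order_py
  dsimp only
  rw [pv_loop1 all_fields _ [] (by decide) (by simp), List.nil_append]
  have hP : ∀ f ∈ all_fields,
      (f ∈ pvPreferred.filter (fun f => decide (f ∈ all_fields)) ↔ f ∈ pvPreferred) := by
    intro f hf; simp [List.mem_filter, hf, pvPreferred]
  have h0 : pvPreferred.filter (fun f => decide (f ∈ all_fields))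
      = pvPreferred.filter (fun f => decide (f ∈ all_fields)) ++ ([] : List String) := by simp
  rw [show (["id", "title", "status", "priority", "asset_id", "location_id",
      "requester_id", "assigned_to_id", "created_at", "updated_at"] : List String)
      = pvPreferred from rfl, h0,
    pv_loop2 pvPreferred _ all_fields [] hP]
  have h3 := pv_loop3 pvPreferred all_fields []
  simp only [List.filter_nil] at h3
  rw [h3]
  congr 1

-- ---- B's stable sort, split into the preferred block and the tail ----

-- insertBy past a suffix every element of which x goes before
theorem pv_insertBy_append (before : String → String → Bool) (x : String) :
    ∀ (S F : List String), (∀ y ∈ F, before x y = true) →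
      PySem.List.insertBy before x (S ++ F) = PySem.List.insertBy before x S ++ F := by
  intro S
  induction S with
  | nil =>
    intro F hF
    cases F with
    | nil => simp
    | cons f F' =>
      simp only [List.nil_append, PySem.List.insertBy]
      rw [if_pos (hF f (List.mem_cons_self ..))]
      rfl
  | cons s S' ih =>
    intro F hF
    simp only [List.cons_append, PySem.List.insertBy]
    by_cases hb : before x s = true
    · rw [if_pos hb, if_pos hb]; rfl
    · rw [if_neg hb, if_neg hb, ih F hF]; rfl

-- stable sort with keys ≤ 10 = sort of the sub-10 part, then the key-10 part in order
theorem pv_sorted_split :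
    ∀ (xs : List String),
      PySem.List.sorted xs pvKey false
        = PySem.List.sorted (xs.filter (fun f => decide (pvKey f < 10))) pvKey false
            ++ xs.filter (fun f => decide (pvKey f = 10)) := by
  intro xs
  induction xs using List.reverseRecOn with
  | nil => simp [PySem.List.sorted]
  | append_singleton xs x ih =>
    rw [PySem.List.sorted_eq_foldl_insertBy, List.foldl_append, List.foldl_cons, List.foldl_nil,
      ← PySem.List.sorted_eq_foldl_insertBy, ih]
    by_cases hx : pvKey x < 10
    · have hxne : ¬ pvKey x = 10 := by omega
      rw [pv_insertBy_append _ x _ _ ?_]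
      · rw [show PySem.List.insertBy (fun a b => decide (pvKey a < pvKey b)) x
              (PySem.List.sorted (xs.filter (fun f => decide (pvKey f < 10))) pvKey false)
            = PySem.List.sorted (xs.filter (fun f => decide (pvKey f < 10)) ++ [x]) pvKey false from ?_]
        · simp [List.filter_append, hx, hxne]
        · rw [PySem.List.sorted_eq_foldl_insertBy, PySem.List.sorted_eq_foldl_insertBy,
            List.foldl_append, List.foldl_cons, List.foldl_nil]
      · intro y hy
        have : pvKey y = 10 := by simpa using (List.mem_filter.mp hy).2
        simp [this, hx]
    · have hx10 : pvKey x = 10 := le_antisymm (pvKey_le x) (by omega)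
      rw [PySem.List.insertBy_of_forall_not_before _ x _ ?_]
      · simp [List.filter_append, hx10, List.append_assoc]
      · intro y hy
        have hyle : pvKey y ≤ 10 := pvKey_le y
        simp only [decide_eq_false_iff_not, not_lt, hx10]
        omega

-- the preferred block of B's sort is exactly A's preferred-present prefix
theorem pv_sorted_pref (all_fields : List String) :
    PySem.List.sorted
        ((PySem.List.dedup all_fields).filter (fun f => decide (pvKey f < 10))) pvKey false
      = pvPreferred.filter (fun f => decide (f ∈ all_fields)) := by
  apply PySem.List.sorted_eq_of_perm_of_pairwise_lt
  · rw [List.perm_ext_iff_of_nodup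
      (List.Nodup.filter _ (by decide))
      (List.Nodup.filter _ (PySem.List.nodup_dedup all_fields))]
    intro f
    simp only [List.mem_filter, PySem.List.mem_dedup, decide_eq_true_eq, pvKey_lt_iff]
    tauto
  · exact List.Pairwise.sublist (List.filter_sublist (l := pvPreferred))
      (by decide : List.Pairwise (fun a b => pvKey a < pvKey b) pvPreferred)

-- ===== VERDICT (by name: the statement is the Claim_ definition above) =====
theorem preferred_field_order_py_spec : Claim_equal_preferred_field_order_py := by
  intro all_fields _
  unfold Spec_preferred_field_order_py
  rw [pvA_char, preferred_field_order_py_alt, pv_sorted_split, pv_sorted_pref]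
  congr 1
  apply List.filter_congr
  intro f hf
  by_cases h : f ∈ pvPreferred
  · have := pvKey_lt_of_mem f h
    simp [h]; omega
  · simp [h, pvKey_of_not_mem f h]
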